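-- pv_equiv track=rewrite | github.com/WoohyunSHIN/algo | Greedy/book/law of large numbers.py | my_main
-- ===== SOURCE A (Python) =====
-- def my_main(m:int, k:int, data:list)->int:
--     ret = 0
--     data = sorted(data, reverse=True)
--     tmp = k
--     while m > 0:
--
--         while k > 0:
--             ret += data[0] # fist bigest number
--             k -= 1
--             m -= 1
--         k = tmp
--         ret += data[1] # second
--         m -= 1
--
--     return ret
-- ===== SOURCE B (Python) =====
-- def my_main(m: int, k: int, data: list) -> int:
--     # Closed form: A adds blocks of k*max + second; each block consumes k+1 units of m.
--     if m <= 0: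
--         return 0
--     s = sorted(data)
--     first, second = s[-1], s[-2]
--     kk = k if k > 0 else 0
--     blocks = -(m // -(kk + 1))  # ceil(m / (kk+1)); A always completes a full block
--     return blocks * (kk * first + second)
-- ===== Notes on version B (the rewrite author's own statement) =====
-- stated objective: faster
-- what changed: A simulates the greedy sum element by element in O(m) loop iterations; B sorts ascending, takes the two largest values and returns ceil(m/(kk+1)) * (kk*max + second) in closed form.
import Mathlib
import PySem

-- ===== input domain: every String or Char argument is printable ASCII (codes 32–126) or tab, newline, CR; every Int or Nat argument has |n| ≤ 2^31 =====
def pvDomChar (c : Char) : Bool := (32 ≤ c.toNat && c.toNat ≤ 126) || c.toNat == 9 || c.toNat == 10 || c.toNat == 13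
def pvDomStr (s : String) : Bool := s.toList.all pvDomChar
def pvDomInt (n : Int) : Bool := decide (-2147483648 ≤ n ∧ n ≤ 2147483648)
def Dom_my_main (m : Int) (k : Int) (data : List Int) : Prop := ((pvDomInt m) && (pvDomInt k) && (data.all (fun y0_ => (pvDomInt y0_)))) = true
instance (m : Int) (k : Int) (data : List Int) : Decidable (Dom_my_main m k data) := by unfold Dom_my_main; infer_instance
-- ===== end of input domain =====

-- B replaces A's element-by-element greedy loop (O(m) additions) by the closed form
-- ceil(m/(kk+1)) blocks of (kk*max + second-max), after an ascending sort. Objective: faster.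

-- ===== PORT A =====
-- inner `while k > 0` loop: state (ret, m); fuel = k.toNat, the exact trip count,
-- so the 0-fuel arm is never taken on the loop's own calls
def pvInnerA (d0 : Int) (fuel : Nat) (ret m k : Int) : Int × Int :=
  match fuel with
  | 0 => (ret, m)
  | fuel + 1 => if 0 < k then pvInnerA d0 fuel (ret + d0) (m - 1) (k - 1) else (ret, m)

-- outer `while m > 0` loop: tmp = the saved k, restored each round; fuel = m.toNat
-- bounds the trip count (each round decreases m by at least 1)
def pvOuterA (d0 d1 tmp : Int) (fuel : Nat) (ret m : Int) : Int :=
  match fuel with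
  | 0 => ret
  | fuel + 1 =>
    if 0 < m then
      pvOuterA d0 d1 tmp fuel
        ((pvInnerA d0 tmp.toNat ret m tmp).1 + d1)
        ((pvInnerA d0 tmp.toNat ret m tmp).2 - 1)
    else ret

-- A's data[0]/data[1] are looked up with default 0: Pre_ guarantees they exist wherever read
def my_main (m : Int) (k : Int) (data : List Int) : Int :=
  let ds := PySem.List.sorted data (fun x => x) true
  pvOuterA (PySem.List.pyGetD ds 0 0) (PySem.List.pyGetD ds 1 0) k m.toNat 0 m

-- ===== PORT B =====
def my_main_alt (m : Int) (k : Int) (data : List Int) : Int :=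
  if m ≤ 0 then 0
  else
    let s := PySem.List.sorted data (fun x => x) false
    let first := PySem.List.pyGetD s (-1) 0
    let second := PySem.List.pyGetD s (-2) 0
    let kk := if 0 < k then k else 0
    let blocks := -(PySem.Int.floordiv m (-(kk + 1)))
    blocks * (kk * first + second)

-- ===== PRECONDITION & SPEC =====
-- Pre_ excludes only inputs where A raises IndexError: m > 0 with fewer than 2 elements.
def Pre_my_main (m : Int) (k : Int) (data : List Int) : Prop := m ≤ 0 ∨ 2 ≤ data.length
instance (m : Int) (k : Int) (data : List Int) : Decidable (Pre_my_main m k data) := by unfold Pre_my_main; infer_instance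
def pvWitness_my_main : Int × Int × List Int := (7, 2, [3, 1, 4, 1, 5])

def Spec_my_main (m : Int) (k : Int) (data : List Int) (out : Int) : Prop := out = my_main_alt m k data
instance (m : Int) (k : Int) (data : List Int) (out : Int) : Decidable (Spec_my_main m k data out) := by unfold Spec_my_main; infer_instance

-- ===== CLAIM (what is proved, stated in full; the proofs are below) =====
def Claim_equal_my_main : Prop := ∀ (m : Int) (k : Int) (data : List Int), Dom_my_main m k data → Pre_my_main m k data → Spec_my_main m k data (my_main m k data)

-- ===== LEMMAS AND PROOFS =====

-- closed form of the inner loop, given enough fuel (it is called with fuel = k.toNat exactly)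
theorem pvInnerA_eq (d0 : Int) : ∀ (fuel : Nat) (ret m k : Int), k.toNat ≤ fuel →
    pvInnerA d0 fuel ret m k = (ret + max k 0 * d0, m - max k 0) := by
  intro fuel
  induction fuel with
  | zero =>
    intro ret m k hf
    have : max k 0 = 0 := by omega
    simp [pvInnerA, this]
  | succ fuel ih =>
    intro ret m k hf
    by_cases h : 0 < k
    · simp only [pvInnerA, h, if_true]
      rw [ih (ret + d0) (m - 1) (k - 1) (by omega)]
      have h1 : max k 0 = (k - 1) + 1 := by omega
      have h2 : max (k - 1) 0 = k - 1 := by omega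
      rw [h1, h2]
      refine Prod.ext ?_ ?_ <;> simp <;> ring
    · have : max k 0 = 0 := by omega
      simp [pvInnerA, h, this]

-- ceiling division -(m // -q) as B computes it
def pvCeil (q m : Int) : Int := -(PySem.Int.floordiv m (-q))

-- bracket characterisation of pvCeil for 0 < q
theorem pvCeil_brackets (q m : Int) (hq : 0 < q) :
    (pvCeil q m - 1) * q < m ∧ m ≤ pvCeil q m * q := by
  have hdm := PySem.Int.floordiv_mul_add_mod m (-q)
  have hb := PySem.Int.mod_neg_bounds m (show -q < 0 by omega)
  set f := PySem.Int.floordiv m (-q) with hf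
  set r := PySem.Int.mod m (-q) with hr
  have h1 : pvCeil q m = -f := rfl
  have h2 : (-f) * q = m - r := by nlinarith [hdm]
  constructor <;> nlinarith [hb.1, hb.2, h2]

theorem pvCeil_unique (q m c : Int) (hq : 0 < q)
    (h1 : (c - 1) * q < m) (h2 : m ≤ c * q) : pvCeil q m = c := by
  obtain ⟨b1, b2⟩ := pvCeil_brackets q m hq
  by_contra hne
  rcases lt_or_gt_of_ne hne with h | h
  · nlinarith
  · nlinarith

theorem pvCeil_step (q m : Int) (hq : 0 < q) (hm : 0 < m) :
    pvCeil q m = (if 0 < m - q then pvCeil q (m - q) else 0) + 1 := by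
  by_cases h : 0 < m - q
  · simp only [h, if_true]
    obtain ⟨b1, b2⟩ := pvCeil_brackets q (m - q) hq
    exact pvCeil_unique q m _ hq (by nlinarith) (by nlinarith)
  · simp only [h, if_false]
    exact pvCeil_unique q m 1 hq (by nlinarith) (by omega)

-- closed form of A's outer loop, given enough fuel (each round consumes max k 0 + 1 ≥ 1 of m)
theorem pvOuterA_eq (d0 d1 k : Int) : ∀ (fuel : Nat) (m ret : Int), m.toNat ≤ fuel →
    pvOuterA d0 d1 k fuel ret m =
      ret + (if 0 < m then pvCeil (max k 0 + 1) m else 0) * (max k 0 * d0 + d1) := by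
  intro fuel
  induction fuel with
  | zero =>
    intro m ret hf
    have h : ¬ 0 < m := by omega
    simp [pvOuterA, h]
  | succ fuel ih =>
    intro m ret hf
    by_cases h : 0 < m
    · simp only [pvOuterA, h, if_true]
      rw [pvInnerA_eq d0 k.toNat ret m k (by omega)]
      simp only
      rw [ih (m - max k 0 - 1) _ (by omega)]
      rw [pvCeil_step (max k 0 + 1) m (by omega) h]
      have hK : m - max k 0 - 1 = m - (max k 0 + 1) := by ring
      rw [hK]
      split_ifs <;> ring
    · simp [pvOuterA, h]

-- descending sort is the reverse of the ascending sort (Int values, identity key)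
theorem pv_sorted_rev_eq_reverse (data : List Int) :
    PySem.List.sorted data (fun x => x) true = (PySem.List.sorted data (fun x => x) false).reverse := by
  apply List.eq_of_perm_of_sorted (le := fun a b : Int => b ≤ a)
  · intro a b _ _ h1 h2; omega
  · exact PySem.List.sorted_pairwise_rev data (fun x => x)
  · rw [List.pairwise_reverse]
    exact PySem.List.sorted_pairwise data (fun x => x)
  · exact (PySem.List.sorted_perm data (fun x => x) true).trans
      ((PySem.List.sorted_perm data (fun x => x) false).symm.trans
        (List.reverse_perm _).symm)

-- index j from the front of the reversed list = index -(j+1) from the back of the original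
theorem pv_getD_rev (s : List Int) (j : Nat) (hj : j < s.length) :
    PySem.List.pyGetD s.reverse ((j : Int)) 0 = PySem.List.pyGetD s (-(j : Int) - 1) 0 := by
  simp only [PySem.List.pyGetD, PySem.List.pyGet?, PySem.List.pyIdx?, List.length_reverse]
  rw [if_pos (by omega), if_pos (by omega), if_neg (by omega), if_pos (by omega)]
  have h1 : ((j : Int)).toNat = j := by omega
  have h2 : (-(-(j : Int) - 1)).toNat = j + 1 := by omega
  rw [h1, h2]
  simp only [Option.bind_some]
  rw [List.getElem?_reverse (by omega)]
  have : s.length - 1 - j = s.length - (j + 1) := by omega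
  rw [this]

-- ===== VERDICT (by name: the statement is the Claim_ definition above) =====
theorem my_main_spec : Claim_equal_my_main := by
  intro m k data hdom hpre
  unfold Spec_my_main my_main my_main_alt
  by_cases hm : m ≤ 0
  · rw [if_pos hm, pvOuterA_eq _ _ _ m.toNat _ _ le_rfl]
    simp [show ¬ 0 < m by omega]
  · rw [if_neg hm, pvOuterA_eq _ _ _ m.toNat _ _ le_rfl]
    have hlen : 2 ≤ data.length := hpre.resolve_left hm
    simp only [show 0 < m by omega, if_true, zero_add]
    rw [pv_sorted_rev_eq_reverse]
    have hls : (PySem.List.sorted data (fun x => x) false).length = data.length :=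
      PySem.List.length_sorted data (fun x => x) false
    have g0 := pv_getD_rev (PySem.List.sorted data (fun x => x) false) 0 (by omega)
    have g1 := pv_getD_rev (PySem.List.sorted data (fun x => x) false) 1 (by omega)
    norm_num at g0 g1
    rw [g0, g1]
    have hkk : (if 0 < k then k else 0) = max k 0 := by split_ifs <;> omega
    simp only [hkk, pvCeil]
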